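-- pv_equiv track=rewrite | github.com/dongho108/breaking-codingtest | wooteco/exam/4.py | solution
-- ===== SOURCE A (Python) =====
-- def solution(s):
--     answer = []
--     ss = s + s
--
--     first = ss[len(s)]
--     i = len(s) - 1
--     count = 0
--     while i >= 0:
--         if ss[i] == first:
--             count += 1
--         else:
--             break
--         i -= 1
--     if count != 0:
--         s = ss[len(s) - count: -count]
--
--     first = s[0]
--     count = 1
--     for i in range(1, len(s)):
--         if first != s[i]:
--             answer.append(count)
--             first = s[i]
--             count = 1
--         else:
--             count += 1
--     answer.append(count)
--     return sorted(answer)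
-- ===== SOURCE B (Python) =====
-- def solution(s):
--     # One forward pass building run lengths, then merge the wrap-around run;
--     # no string doubling, no rotation slice.
--     runs = []
--     prev = None
--     for ch in s:
--         if runs and ch == prev:
--             runs[-1] += 1
--         else:
--             runs.append(1)
--         prev = ch
--     if len(runs) > 1 and s[0] == s[-1]:
--         runs[0] += runs.pop()
--     return sorted(runs)
-- ===== Notes on version B (the rewrite author's own statement) =====
-- stated objective: simpler
-- what changed: A doubles the string, scans backwards with a while loop to find the wrap-around run and rotates via a slice before run-length encoding; B run-length-encodes the string in one forward pass and then merges the first and last runs when the string wraps around (more than one run and s[0]==s[-1]).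
import Mathlib
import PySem

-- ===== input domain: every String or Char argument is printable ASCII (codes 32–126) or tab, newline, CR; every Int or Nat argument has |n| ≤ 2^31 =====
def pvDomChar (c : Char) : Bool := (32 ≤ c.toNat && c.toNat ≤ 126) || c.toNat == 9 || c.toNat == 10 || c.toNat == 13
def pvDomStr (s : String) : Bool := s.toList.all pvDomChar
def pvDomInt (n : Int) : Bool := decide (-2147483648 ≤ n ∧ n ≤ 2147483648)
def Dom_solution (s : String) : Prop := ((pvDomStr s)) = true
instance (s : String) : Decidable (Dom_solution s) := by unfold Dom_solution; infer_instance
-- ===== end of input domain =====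

-- B replaces A's double-the-string / backward while-scan / rotation-slice with a single
-- forward run-length pass plus an explicit wrap-around merge (objective: simpler).

-- ===== PORT A =====
-- 'while i >= 0: if ss[i] == first: count += 1 else: break; i -= 1'  (fuel = i + 1)
def solWhile (ss : List Char) (first : Char) : Nat → Int → Int
  | 0, count => count
  | i+1, count =>
      if PySem.List.pyGetD ss (i : Int) ' ' = first then solWhile ss first i (count + 1)
      else count

-- body of 'for i in range(1, len(s))'
def solStep (acc : List Int × Char × Int) (c : Char) : List Int × Char × Int :=
  if acc.2.1 ≠ c then (acc.1 ++ [acc.2.2], c, 1) else (acc.1, acc.2.1, acc.2.2 + 1)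

def solution (s : String) : List Int :=
  let t := s.toList
  let ss := t ++ t
  let first := PySem.List.pyGetD ss (PySem.List.len t) ' '   -- ss[len(s)]; IndexError iff s = "" (Pre_)
  let count := solWhile ss first t.length 0
  let t2 := if count ≠ 0 then PySem.List.slice ss (some (PySem.List.len t - count)) (some (-count)) else t
  let first2 := PySem.List.pyGetD t2 0 ' '
  let r := (PySem.List.pyRange 1 (PySem.List.len t2) 1).foldl
      (fun acc i => solStep acc (PySem.List.pyGetD t2 i ' ')) ([], first2, 1)
  PySem.List.sorted (r.1 ++ [r.2.2]) (fun x => x) false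

-- ===== PORT B =====
-- 'runs[-1] += 1'
def altIncLast : List Int → List Int
  | [] => []
  | [x] => [x + 1]
  | x :: y :: xs => x :: altIncLast (y :: xs)

def altStep (acc : List Int × Option Char) (ch : Char) : List Int × Option Char :=
  if acc.1 ≠ [] ∧ acc.2 = some ch then (altIncLast acc.1, some ch) else (acc.1 ++ [1], some ch)

def solution_alt (s : String) : List Int :=
  let runs := (s.toList.foldl altStep ([], none)).1
  let runs2 :=
    if 1 < runs.length ∧ PySem.List.pyGetD s.toList 0 ' ' = PySem.List.pyGetD s.toList (-1) ' ' then
      -- runs[0] += runs.pop()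
      let popped := runs.dropLast
      (popped.headD 0 + runs.getLastD 0) :: popped.tail
    else runs
  PySem.List.sorted runs2 (fun x => x) false

-- ===== PRECONDITION & SPEC =====
-- Pre_ excludes only the empty string, on which A raises IndexError (ss[len(s)]).
def Pre_solution (s : String) : Prop := s ≠ ""
instance (s : String) : Decidable (Pre_solution s) := by unfold Pre_solution; infer_instance
def pvWitness_solution : String := "aab"

def Spec_solution (s : String) (out : List Int) : Prop := out = solution_alt s
instance (s : String) (out : List Int) : Decidable (Spec_solution s out) := by unfold Spec_solution; infer_instance

-- ===== CLAIM (what is proved, stated in full; the proofs are below) =====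
def Claim_equal_solution : Prop := ∀ (s : String), Dom_solution s → Pre_solution s → Spec_solution s (solution s)

-- ===== LEMMAS AND PROOFS =====

-- run-length encoding spec
def runAux (h : Char) (cnt : Int) : List Char → List Int
  | [] => [cnt]
  | c :: cs => if h ≠ c then cnt :: runAux c 1 cs else runAux c (cnt + 1) cs

theorem runAux_ne_nil (h : Char) (c : Int) (l : List Char) : runAux h c l ≠ [] := by
  cases l with
  | nil => simp [runAux]
  | cons a l => simp only [runAux]; split <;> [simp; exact runAux_ne_nil a (c+1) l]

-- A's for-loop fold produces runAux
theorem foldA (l : List Char) : ∀ (ans : List Int) (h : Char) (c : Int),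
    (l.foldl solStep (ans, h, c)).1 ++ [(l.foldl solStep (ans, h, c)).2.2] = ans ++ runAux h c l := by
  induction l with
  | nil => intro ans h c; simp [runAux]
  | cons a l ih =>
    intro ans h c
    by_cases hc : h ≠ a
    · simp only [List.foldl_cons, solStep, if_pos hc, runAux, ih]
      simp
    · simp only [List.foldl_cons, solStep, if_neg hc, runAux, ih]
      simp at hc; subst hc; simp

-- B's fold produces runAux
theorem altIncLast_concat (l : List Int) (c : Int) : altIncLast (l ++ [c]) = l ++ [c + 1] := by
  induction l with
  | nil => simp [altIncLast]
  | cons a l ih =>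
    cases l with
    | nil => simp [altIncLast]
    | cons b l => simpa [altIncLast] using ih

theorem foldB (l : List Char) : ∀ (pre : List Int) (h : Char) (c : Int),
    (l.foldl altStep (pre ++ [c], some h)).1 = pre ++ runAux h c l := by
  induction l with
  | nil => intro pre h c; simp [runAux]
  | cons a l ih =>
    intro pre h c
    by_cases hc : h = a
    · subst hc
      simp only [List.foldl_cons, altStep, altIncLast_concat, runAux]
      simp [ih]
    · have : ¬((pre ++ [c] : List Int) ≠ [] ∧ (some h = some a)) := by simp [hc]
      simp only [List.foldl_cons, altStep, if_neg this, runAux, if_pos (by simpa using hc)]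
      rw [show (pre ++ [c]) ++ [(1:Int)] = (pre ++ [c]) ++ [1] from rfl, ih]
      simp

theorem foldB0 (x : Char) (xs : List Char) :
    ((x :: xs).foldl altStep ([], none)).1 = runAux x 1 xs := by
  have h1 : (x :: xs).foldl altStep ([], none) = xs.foldl altStep (([] : List Int) ++ [1], some x) := by
    simp [altStep]
  rw [h1, foldB]; simp

-- the while loop counts the leading run of the reversed prefix
theorem whileLemma (x : Char) : ∀ (rl rest : List Char) (c : Int),
    solWhile (rl.reverse ++ rest) x rl.length c
      = c + ((rl.takeWhile (· == x)).length : Int) := by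
  intro rl
  induction rl with
  | nil => intro rest c; simp [solWhile]
  | cons a rl ih =>
    intro rest c
    have hget : PySem.List.pyGetD ((a :: rl).reverse ++ rest) ((rl.length : Nat) : Int) ' ' = a := by
      rw [PySem.List.pyGetD_natCast]
      have : (a :: rl).reverse ++ rest = rl.reverse ++ (a :: rest) := by simp
      rw [this]
      have hl : rl.reverse.length = rl.length := by simp
      rw [← hl]
      simp [List.getD_eq_getElem?_getD]
    show solWhile ((a :: rl).reverse ++ rest) x (rl.length + 1) c = _
    rw [solWhile, hget]
    by_cases hax : a = x
    · subst hax
      rw [if_pos rfl]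
      have : (a :: rl).reverse ++ rest = rl.reverse ++ (a :: rest) := by simp
      rw [this, ih (a :: rest) (c + 1)]
      simp [List.takeWhile]
      ring_nf
    · rw [if_neg hax]
      simp [hax]

-- runAux over a block of equal characters
theorem runAux_replicate_append (x : Char) : ∀ (k : Nat) (c : Int) (F : List Char),
    runAux x c (List.replicate k x ++ F) = runAux x (c + k) F := by
  intro k
  induction k with
  | zero => intro c F; simp
  | succ k ih =>
    intro c F
    rw [List.replicate_succ, List.cons_append, runAux, if_neg (by simp)]
    rw [ih (c + 1) F]
    congr 1
    push_cast; ring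

-- bumping the starting count bumps the first run
theorem runAux_head_add (x : Char) : ∀ (F : List Char) (c d : Int),
    runAux x (c + d) F = ((runAux x c F).headD 0 + d) :: (runAux x c F).tail := by
  intro F
  induction F with
  | nil => intro c d; simp [runAux]
  | cons a F ih =>
    intro c d
    by_cases hax : x ≠ a
    · simp [runAux, if_pos hax]
    · simp only [ne_eq, not_not] at hax
      subst hax
      rw [runAux, if_neg (by simp), runAux, if_neg (by simp)]
      have : c + d + 1 = (c + 1) + d := by ring
      rw [this, ih (c + 1) d]

-- a trailing block of x after a list not ending in x becomes one extra run
theorem runAux_append_replicate (x : Char) (m : Nat) (hm : 0 < m) :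
    ∀ (l : List Char) (b : Char), l.getLast? = some b → b ≠ x →
    ∀ (h : Char) (c : Int), runAux h c (l ++ List.replicate m x) = runAux h c l ++ [(m : Int)] := by
  intro l
  induction l with
  | nil => intro b hb _ _ _; simp at hb
  | cons a l ih =>
    intro b hb hbx h c
    cases l with
    | nil =>
      simp at hb; subst hb
      have hax : a ≠ x := hbx
      obtain ⟨mm, rfl⟩ : ∃ mm, m = mm + 1 := ⟨m - 1, by omega⟩
      have hx : runAux x 1 (List.replicate mm x) = [1 + (mm : Int)] := by
        simpa using runAux_replicate_append x mm 1 []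
      rw [List.cons_append, List.nil_append, List.replicate_succ]
      by_cases hha : h ≠ a
      · rw [runAux, if_pos hha, runAux, if_pos hax, hx]
        simp [runAux, hha]
        omega
      · rw [runAux, if_neg hha, runAux, if_pos hax, hx]
        simp [runAux, hha]
        omega
    | cons a' l' =>
      have hb' : (a' :: l').getLast? = some b := by
        rw [← hb]; exact (List.getLast?_cons_cons ..).symm
      by_cases hha : h ≠ a
      · rw [List.cons_append, runAux, if_pos hha, runAux, if_pos hha,
            ih b hb' hbx a 1]
        simp
      · rw [List.cons_append, runAux, if_neg hha, runAux, if_neg hha,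
            ih b hb' hbx a (c + 1)]

theorem getD_append_cons (pre : List Char) (x : Char) (l : List Char) :
    (pre ++ x :: l).getD pre.length ' ' = x := by
  simp [List.getD_eq_getElem?_getD]

theorem sliceEq (l : List Char) (a b : Int) : PySem.List.slice l (some a) (some b)
    = (l.drop (PySem.List.clampIdx l.length a)).take
        (PySem.List.clampIdx l.length b - PySem.List.clampIdx l.length a) := rfl

theorem foldRange1 (l : List Char) (init : List Int × Char × Int) :
    (PySem.List.pyRange 1 (PySem.List.len l) 1).foldl
        (fun acc j => solStep acc (PySem.List.pyGetD l j ' ')) init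
      = (l.drop 1).foldl solStep init := by
  have := PySem.List.foldl_pyRange_pyGetD (xs := l) (a := 1) (d := ' ') (f := solStep) (init := init)
    (by norm_num)
  simpa using this

-- A's run-length pass on a nonempty list y :: ys computes runAux y 1 ys
theorem Alist (y : Char) (ys : List Char) :
    (((PySem.List.pyRange 1 (PySem.List.len (y :: ys)) 1).foldl
        (fun acc i => solStep acc (PySem.List.pyGetD (y :: ys) i ' '))
        ([], PySem.List.pyGetD (y :: ys) 0 ' ', 1)).1
      ++ [((PySem.List.pyRange 1 (PySem.List.len (y :: ys)) 1).foldl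
        (fun acc i => solStep acc (PySem.List.pyGetD (y :: ys) i ' '))
        ([], PySem.List.pyGetD (y :: ys) 0 ' ', 1)).2.2]) = runAux y 1 ys := by
  rw [foldRange1, PySem.List.pyGetD_zero_cons y ys ' ', List.drop_one, List.tail_cons]
  simpa using foldA ys [] y 1

theorem solution_eq (s : String) (hs : s.toList ≠ []) : solution s = solution_alt s := by
  obtain ⟨x, xs, ht⟩ : ∃ x xs, s.toList = x :: xs := by
    cases h : s.toList with
    | nil => exact absurd h hs
    | cons a l => exact ⟨a, l, rfl⟩
  have hfirst : PySem.List.pyGetD (s.toList ++ s.toList) (PySem.List.len s.toList) ' ' = x := by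
    rw [PySem.List.len_eq, PySem.List.pyGetD_natCast, ht]
    exact getD_append_cons (x :: xs) x xs
  set cN := ((s.toList.reverse.takeWhile (· == x)).length) with hcNdef
  have hcount : solWhile (s.toList ++ s.toList) x s.toList.length 0 = (cN : Int) := by
    have h := whileLemma x s.toList.reverse s.toList 0
    simpa using h
  have hcle : cN ≤ s.toList.length := by
    calc cN ≤ s.toList.reverse.length := List.Sublist.length_le (List.takeWhile_sublist _)
    _ = s.toList.length := by simp
  set P := (s.toList.reverse.dropWhile (· == x)).reverse with hPdef
  have htw : s.toList.reverse.takeWhile (· == x) = List.replicate cN x := by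
    rw [List.eq_replicate_iff]
    refine ⟨rfl, fun c hc => ?_⟩
    have := List.mem_takeWhile_imp hc
    simpa using this
  have hdecomp : s.toList = P ++ List.replicate cN x := by
    conv_lhs => rw [← List.reverse_reverse s.toList,
      ← List.takeWhile_append_dropWhile (p := (· == x)) (l := s.toList.reverse)]
    rw [List.reverse_append, htw, List.reverse_replicate]
  have hPlen : P.length = s.toList.length - cN := by
    have : s.toList.length = P.length + cN := by
      conv_lhs => rw [hdecomp]
      simp
    omega
  have hget0 : PySem.List.pyGetD s.toList 0 ' ' = x := by
    rw [ht]; exact PySem.List.pyGetD_zero_cons x xs ' '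
  have hrunsB : (s.toList.foldl altStep ([], none)).1 = runAux x 1 xs := by
    rw [ht]; exact foldB0 x xs
  clear_value cN P
  by_cases h0 : cN = 0
  · -- no wrap-around run: A does not rotate, B does not merge
    have hrev : s.toList.reverse ≠ [] := by simp [ht]
    obtain ⟨h₁, rest, hr⟩ := List.exists_cons_of_ne_nil hrev
    have hbx : ¬ (h₁ = x) := by
      intro hEq
      rw [hcNdef, hr, List.takeWhile_cons, show (h₁ == x) = true by simp [hEq]] at h0
      simp at h0
    have hlastq : PySem.List.pyGetD s.toList (-1) ' ' = h₁ := by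
      have hform : s.toList = rest.reverse ++ [h₁] := by
        have := congrArg List.reverse hr
        simpa using this
      rw [hform, PySem.List.pyGetD_neg_one_append_singleton]
    have hcond : ¬ (1 < ((s.toList.foldl altStep ([], none)).1).length ∧
        PySem.List.pyGetD s.toList 0 ' ' = PySem.List.pyGetD s.toList (-1) ' ') := by
      rw [hget0, hlastq]
      rintro ⟨-, hxe⟩
      exact hbx hxe.symm
    simp only [solution, solution_alt, hfirst, hcount, h0, Nat.cast_zero, ne_eq,
      not_true_eq_false, if_false, if_neg hcond]
    rw [hrunsB]
    congr 1
    rw [ht]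
    exact Alist x xs
  · -- rotation case: cN ≥ 1
    have hcN1 : 0 < cN := Nat.pos_of_ne_zero h0
    have hint : (cN : Int) ≠ 0 := Int.natCast_ne_zero.mpr h0
    have hR : List.replicate cN x = x :: List.replicate (cN - 1) x := by
      cases cN with
      | zero => omega
      | succ k => simp [List.replicate_succ]
    have hslice : PySem.List.slice (s.toList ++ s.toList)
        (some (PySem.List.len s.toList - (cN : Int))) (some (-(cN : Int)))
        = List.replicate cN x ++ P := by
      rw [PySem.List.len_eq]
      have h1 : (s.toList.length : Int) - (cN : Int) = ((s.toList.length - cN : Nat) : Int) := by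
        omega
      rw [h1, sliceEq, PySem.List.clampIdx_natCast, PySem.List.clampIdx_neg_natCast _ cN hcN1]
      simp only [List.length_append]
      rw [show min (s.toList.length - cN) (s.toList.length + s.toList.length)
            = s.toList.length - cN from by omega,
          show s.toList.length + s.toList.length - cN - (s.toList.length - cN)
            = s.toList.length from by omega]
      rw [show s.toList ++ s.toList = P ++ (List.replicate cN x ++ s.toList) from by
            rw [← List.append_assoc, ← hdecomp],
          ← hPlen, List.drop_left, List.take_append,
          List.take_of_length_le (by simpa using hcle)]
      congr 1
      simp only [List.length_replicate]
      rw [← hPlen]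
      conv_lhs => rw [hdecomp]
      exact List.take_left ..
    by_cases hPnil : P = []
    · -- the whole string is one run: rotation is the identity, B has a single run
      have htR : s.toList = List.replicate cN x := by
        conv_lhs => rw [hdecomp, hPnil]
        simp
      have hxs : xs = List.replicate (cN - 1) x := by
        have h2 : x :: xs = x :: List.replicate (cN - 1) x := by rw [← ht, htR, hR]
        simpa using congrArg List.tail h2
      have hruns1 : runAux x 1 xs = [1 + ((cN - 1 : Nat) : Int)] := by
        rw [hxs]
        simpa using runAux_replicate_append x (cN - 1) 1 []
      have hcond : ¬ (1 < ((s.toList.foldl altStep ([], none)).1).length ∧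
          PySem.List.pyGetD s.toList 0 ' ' = PySem.List.pyGetD s.toList (-1) ' ') := by
        rw [hrunsB, hruns1]
        rintro ⟨h1, -⟩
        simp at h1
      simp only [solution, solution_alt, hfirst, hcount, if_pos hint, hslice, hPnil,
        List.append_nil, ← htR, if_neg hcond]
      rw [hrunsB]
      congr 1
      rw [ht]
      exact Alist x xs
    · -- genuine rotation: A rotates the wrap run to the front, B merges first and last runs
      obtain ⟨P'', hP⟩ : ∃ P'', P = x :: P'' := by
        have hhead : P.head? = some x := by
          have := congrArg List.head? hdecomp
          rw [ht, List.head?_append_of_ne_nil _ hPnil] at this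
          exact this.symm
        cases hp : P with
        | nil => exact absurd hp hPnil
        | cons a l => rw [hp] at hhead; simp at hhead; exact ⟨l, by rw [hhead]⟩
      obtain ⟨b, hblast, hbx⟩ : ∃ b, P.getLast? = some b ∧ b ≠ x := by
        have hdw : s.toList.reverse.dropWhile (· == x) ≠ [] := fun hnil =>
          hPnil (by rw [hPdef, hnil]; rfl)
        obtain ⟨d, ds, hds⟩ := List.exists_cons_of_ne_nil hdw
        refine ⟨d, ?_, ?_⟩
        · rw [hPdef, hds]
          simp
        · have hnd := List.head_dropWhile_not _ hdw
          simp only [hds, List.head_cons] at hnd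
          simpa using hnd
      have hP'' : P'' ≠ [] := by
        intro hnil
        rw [hP, hnil] at hblast
        simp at hblast
        exact hbx hblast.symm
      obtain ⟨p1, prest, hp1⟩ := List.exists_cons_of_ne_nil hP''
      have hP''last : P''.getLast? = some b := by
        rw [hP, hp1, List.getLast?_cons_cons] at hblast
        rw [hp1]
        exact hblast
      have hxs2 : xs = P'' ++ List.replicate cN x := by
        have h2 : x :: xs = x :: (P'' ++ List.replicate cN x) := by
          rw [← ht, hdecomp, hP]; rfl
        simpa using congrArg List.tail h2
      have hsplit : List.replicate cN x = List.replicate (cN - 1) x ++ [x] := by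
        conv_lhs => rw [show cN = cN - 1 + 1 from by omega]
        exact List.replicate_succ' ..
      have hlastx : PySem.List.pyGetD s.toList (-1) ' ' = x := by
        have hform : s.toList = (P ++ List.replicate (cN - 1) x) ++ [x] := by
          rw [hdecomp, hsplit, List.append_assoc]
        rw [hform, PySem.List.pyGetD_neg_one_append_singleton]
      have hrunsEq : runAux x 1 xs = runAux x 1 P'' ++ [(cN : Int)] := by
        rw [hxs2]
        exact runAux_append_replicate x cN hcN1 P'' b hP''last hbx x 1
      have hcond : (1 < ((s.toList.foldl altStep ([], none)).1).length ∧
          PySem.List.pyGetD s.toList 0 ' ' = PySem.List.pyGetD s.toList (-1) ' ') := by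
        refine ⟨?_, by rw [hget0, hlastx]⟩
        rw [hrunsB, hrunsEq]
        have := runAux_ne_nil x 1 P''
        cases hq : runAux x 1 P'' with
        | nil => exact absurd hq this
        | cons q l => simp
      -- A's rotated list starts with x and continues with the rest of the wrap run then P
      have ht2 : List.replicate cN x ++ P = x :: (List.replicate (cN - 1) x ++ P) := by
        rw [hR]; rfl
      have hAlist : runAux x 1 (List.replicate (cN - 1) x ++ P)
          = ((runAux x 1 P'').headD 0 + (cN : Int)) :: (runAux x 1 P'').tail := by
        rw [runAux_replicate_append x (cN - 1) 1 P, hP, runAux, if_neg (by simp)]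
        rw [show (1 : Int) + ((cN - 1 : Nat) : Int) + 1 = 1 + (cN : Int) from by omega]
        exact runAux_head_add x P'' 1 (cN : Int)
      simp only [solution, solution_alt, hfirst, hcount, if_pos hint, hslice, if_pos hcond]
      rw [hrunsB, hrunsEq, ht2]
      rw [Alist x (List.replicate (cN - 1) x ++ P), hAlist]
      rw [List.dropLast_concat, show (runAux x 1 P'' ++ [(cN : Int)]).getLastD 0 = (cN : Int) from by simp]

-- ===== VERDICT (by name: the statement is the Claim_ definition above) =====
theorem solution_spec : Claim_equal_solution := by
  intro s _ hpre
  unfold Spec_solution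
  exact solution_eq s (by simpa using (hpre : s ≠ ""))
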